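-- pv_equiv track=rewrite | github.com/MattZid/DSC_258 | HW3/homework3.py | featureCat
-- ===== SOURCE A (Python) =====
-- import string
--
-- def featureCat(datum, words, wordId, wordSet):
--     feat = [0]*len(words)
--
--     # Compute features counting instance of each word in "words"
--     # after converting to lower case and removing punctuation
--     punctuation = set(string.punctuation)
--     review = ''.join([c for c in datum['review_text'].lower() if c not in punctuation])
--     for w in review.split():
--         if w in wordSet:
--             feat[wordId[w]] += 1
--
--     feat.append(1) # offset (put at the end)
--     return feat
-- ===== SOURCE B (Python) =====
-- import string
--
--
-- def featureCat(datum, words, wordId, wordSet):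
--     # Count all tokens of the cleaned review once, accumulate per-INDEX totals
--     # in a dict keyed by feature position, then materialise the vector with a
--     # comprehension over range(len(words)).  No positional list is mutated.
--     cleaned = datum['review_text'].lower().translate(
--         str.maketrans('', '', string.punctuation))
--     counts = {}
--     for t in cleaned.split():
--         counts[t] = counts.get(t, 0) + 1
--     acc = {}
--     for w in wordSet:
--         if w in counts:
--             j = wordId[w]
--             acc[j] = acc.get(j, 0) + counts[w]
--     return [acc.get(j, 0) for j in range(len(words))] + [1]
-- ===== Notes on version B (the rewrite author's own statement) =====
-- stated objective: alternative
-- what changed: B never mutates a positional list: it counts all tokens once, folds the vocabulary into a dict keyed by feature INDEX, and builds the output vector with a comprehension over range(len(words)), whereas A scans the token stream and increments slots of a preallocated list in place.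
-- outside the precondition, e.g. on featureCat({'review_text': 'a a'}, ['x', 'y'], {'a': -1}, {'a'}): A returns [0, 2, 1], B returns [0, 0, 1]
import Mathlib
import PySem

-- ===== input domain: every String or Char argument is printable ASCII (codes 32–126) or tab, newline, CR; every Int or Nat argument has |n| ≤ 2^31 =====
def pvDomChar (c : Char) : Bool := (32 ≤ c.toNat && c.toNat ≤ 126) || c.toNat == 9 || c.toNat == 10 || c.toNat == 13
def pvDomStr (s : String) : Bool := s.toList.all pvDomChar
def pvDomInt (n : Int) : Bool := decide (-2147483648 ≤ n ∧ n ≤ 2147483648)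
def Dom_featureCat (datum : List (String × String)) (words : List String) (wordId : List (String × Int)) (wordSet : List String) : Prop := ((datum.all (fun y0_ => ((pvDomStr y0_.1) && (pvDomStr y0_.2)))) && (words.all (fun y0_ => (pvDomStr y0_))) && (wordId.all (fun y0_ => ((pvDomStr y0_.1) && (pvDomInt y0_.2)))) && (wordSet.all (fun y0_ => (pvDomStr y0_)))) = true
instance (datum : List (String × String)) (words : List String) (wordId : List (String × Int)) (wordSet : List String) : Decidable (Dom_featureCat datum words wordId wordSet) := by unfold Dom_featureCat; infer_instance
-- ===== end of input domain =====

-- B replaces A's in-place increments of a preallocated list by a count-then-group-by-index dict and a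
-- comprehension over range(len(words)) (alternative decomposition; same cost).

-- shared helpers: string.punctuation, the cleaned/tokenised review, and wordId[w]
def pvPunct : PySem.Set Char := PySem.Set.ofList "!\"#$%&'()*+,-./:;<=>?@[\\]^_`{|}~".toList

-- datum['review_text'].lower() with punctuation removed, then .split()
-- (A writes the removal as ''.join([c for c in … if c not in punctuation]), B as translate with a
-- deletion table built by str.maketrans('', '', string.punctuation): both are exactly this char filter)
def pvClean (datum : List (String × String)) : List String :=
  PySem.Str.split₀ (String.ofList (((PySem.Str.lower (PySem.Dict.getD (PySem.Dict.mk datum) "review_text" "")).toList).filter (fun c => !(PySem.Set.contains pvPunct c))))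

-- wordId[w] (total form; Pre_ guarantees the key is present for every w the ports look up)
def pvWid (wordId : List (String × Int)) (w : String) : Int :=
  PySem.Dict.getD (PySem.Dict.mk wordId) w 0

-- ===== PORT A =====
def featureCat (datum : List (String × String)) (words : List String) (wordId : List (String × Int)) (wordSet : List String) : List Int :=
  (( (pvClean datum).foldl (fun feat w =>
      if PySem.Set.contains wordSet w then
        PySem.List.pySetD feat (pvWid wordId w) (PySem.List.pyGetD feat (pvWid wordId w) 0 + 1)
      else feat)
     (List.replicate words.length (0 : Int))) ++ [1])

-- ===== PORT B =====
def featureCat_alt (datum : List (String × String)) (words : List String) (wordId : List (String × Int)) (wordSet : List String) : List Int :=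
  let counts := (pvClean datum).foldl (fun d t => d.insert t (d.getD t 0 + 1)) PySem.Dict.empty
  let acc := wordSet.foldl (fun (a : PySem.Dict Int Int) w =>
      if PySem.Dict.contains counts w then
        a.insert (pvWid wordId w) (a.getD (pvWid wordId w) 0 + counts.getD w 0)
      else a) PySem.Dict.empty
  ((List.range words.length).map (fun (j : Nat) => acc.getD (j : Int) 0)) ++ [1]

-- ===== PRECONDITION & SPEC =====
-- Pre_ requires datum to contain the 'review_text' key, wordSet to be duplicate-free (it is a Python
-- set), and every wordSet word that occurs in the cleaned review to have a wordId entry with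
-- 0 ≤ id < len(words) — the well-formed vocabulary; A also happens to return on excluded inputs
-- where a negative id wraps around Python-style (see the cite in the claim).
def Pre_featureCat (datum : List (String × String)) (words : List String) (wordId : List (String × Int)) (wordSet : List String) : Prop :=
  PySem.Dict.contains (PySem.Dict.mk datum) "review_text" = true ∧ wordSet.Nodup ∧
  wordSet.all (fun w => !((pvClean datum).contains w) || ((PySem.Dict.mk wordId).get? w).any (fun i => decide (0 ≤ i ∧ i < (words.length : Int)))) = true
instance (datum : List (String × String)) (words : List String) (wordId : List (String × Int)) (wordSet : List String) : Decidable (Pre_featureCat datum words wordId wordSet) := by unfold Pre_featureCat; infer_instance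

def pvWitness_featureCat : (List (String × String)) × List String × (List (String × Int)) × List String :=
  ([("review_text", "A good, good read!")], ["good", "bad"], [("good", 0), ("bad", 1)], ["good", "bad"])

def Spec_featureCat (datum : List (String × String)) (words : List String) (wordId : List (String × Int)) (wordSet : List String) (out : List Int) : Prop := out = featureCat_alt datum words wordId wordSet
instance (datum : List (String × String)) (words : List String) (wordId : List (String × Int)) (wordSet : List String) (out : List Int) : Decidable (Spec_featureCat datum words wordId wordSet out) := by unfold Spec_featureCat; infer_instance

-- ===== CLAIM (what is proved, stated in full; the proofs are below) =====
def Claim_equal_featureCat : Prop := ∀ (datum : List (String × String)) (words : List String) (wordId : List (String × Int)) (wordSet : List String), Dom_featureCat datum words wordId wordSet → Pre_featureCat datum words wordId wordSet → Spec_featureCat datum words wordId wordSet (featureCat datum words wordId wordSet)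

-- ===== LEMMAS AND PROOFS =====

theorem pvWitness_ok : Dom_featureCat (pvWitness_featureCat.1) (pvWitness_featureCat.2.1) (pvWitness_featureCat.2.2.1) (pvWitness_featureCat.2.2.2) ∧ Pre_featureCat (pvWitness_featureCat.1) (pvWitness_featureCat.2.1) (pvWitness_featureCat.2.2.1) (pvWitness_featureCat.2.2.2) := by
  decide

-- A's loop keeps the feature vector's length
theorem pvA_len (wordId : List (String × Int)) (wordSet toks : List String) (feat : List Int) :
    (toks.foldl (fun feat w =>
      if PySem.Set.contains wordSet w then
        PySem.List.pySetD feat (pvWid wordId w) (PySem.List.pyGetD feat (pvWid wordId w) 0 + 1)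
      else feat) feat).length = feat.length := by
  induction toks generalizing feat with
  | nil => rfl
  | cons t ts ih =>
      simp only [List.foldl_cons]
      rw [ih]
      split <;> simp [PySem.List.length_pySetD]

-- entry j of A's loop result: initial value plus the number of in-vocabulary tokens mapped to j
theorem pvA_get (wordId : List (String × Int)) (wordSet toks : List String) (feat : List Int) (j : Nat)
    (hw : ∀ w ∈ wordSet, w ∈ toks → 0 ≤ pvWid wordId w ∧ pvWid wordId w < (feat.length : Int)) :
    List.getD (toks.foldl (fun feat w =>
      if PySem.Set.contains wordSet w then
        PySem.List.pySetD feat (pvWid wordId w) (PySem.List.pyGetD feat (pvWid wordId w) 0 + 1)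
      else feat) feat) j 0
    = List.getD feat j 0 + (toks.countP (fun t => PySem.Set.contains wordSet t && decide ((pvWid wordId t).toNat = j)) : Int) := by
  induction toks generalizing feat with
  | nil => simp
  | cons t ts ih =>
      simp only [List.foldl_cons, List.countP_cons]
      by_cases hc : PySem.Set.contains wordSet t = true
      · have hmem : t ∈ wordSet := (PySem.Set.contains_iff wordSet t).1 hc
        obtain ⟨h0, hl⟩ := hw t hmem (List.mem_cons_self ..)
        have hnat : (pvWid wordId t).toNat < feat.length := by omega
        rw [if_pos hc]
        rw [PySem.List.pySetD_of_nonneg _ _ h0, PySem.List.pyGetD_eq_getElem _ _ h0 hl]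
        rw [ih _ (by intro w hwm hwt; simpa [List.length_set] using hw w hwm (List.mem_cons_of_mem _ hwt))]
        by_cases hj : (pvWid wordId t).toNat = j
        · subst hj
          rw [List.getD_eq_getElem _ 0 (by simpa using hnat), List.getD_eq_getElem _ 0 hnat]
          simp only [List.getElem_set_self, hc, decide_true, Bool.and_true, if_true]
          push_cast
          ring
        · have hkeep : List.getD (feat.set (pvWid wordId t).toNat (feat[(pvWid wordId t).toNat] + 1)) j 0 = List.getD feat j 0 := by
            by_cases hjl : j < feat.length
            · rw [List.getD_eq_getElem _ _ (by simpa using hjl), List.getD_eq_getElem _ _ hjl]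
              exact List.getElem_set_ne hj _
            · rw [List.getD_eq_default _ _ (by simpa using Nat.le_of_not_lt hjl),
                  List.getD_eq_default _ _ (Nat.le_of_not_lt hjl)]
          rw [hkeep]
          simp [hj]
      · have hm : t ∉ wordSet := fun h => hc ((PySem.Set.contains_iff wordSet t).2 h)
        rw [if_neg hc, ih _ (fun w hwm hwt => hw w hwm (List.mem_cons_of_mem _ hwt))]
        simp [hm]

-- entry k of B's accumulator dict: initial value plus the summed counts of vocabulary words mapped to k
theorem pvB_get (wordId : List (String × Int)) (toks ws : List String) (a : PySem.Dict Int Int) (k : Int) :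
    (ws.foldl (fun (a : PySem.Dict Int Int) w =>
      if PySem.Dict.contains (PySem.Dict.counter toks) w then
        a.insert (pvWid wordId w) (a.getD (pvWid wordId w) 0 + (PySem.Dict.counter toks).getD w 0)
      else a) a).getD k 0
    = a.getD k 0 + (ws.map (fun w => if pvWid wordId w = k ∧ w ∈ toks then (toks.count w : Int) else 0)).sum := by
  induction ws generalizing a with
  | nil => simp
  | cons w ws ih =>
      simp only [List.foldl_cons, List.map_cons, List.sum_cons]
      by_cases hc : PySem.Dict.contains (PySem.Dict.counter toks) w = true
      · have hwt : w ∈ toks := by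
          have := PySem.Dict.contains_counter toks w
          rw [hc] at this
          exact List.contains_iff_mem.1 this.symm
        rw [if_pos hc, ih, PySem.Dict.getD_insert, PySem.Dict.getD_counter]
        by_cases hk : k = pvWid wordId w
        · simp [hk, hwt]; ring
        · simp only [if_neg hk, if_neg (fun h : pvWid wordId w = k ∧ w ∈ toks => hk h.1.symm)]
          ring
      · have hnt : w ∉ toks := by
          intro h
          exact hc ((PySem.Dict.contains_counter toks w) ▸ List.contains_iff_mem.2 h)
        rw [if_neg hc, ih]
        simp [hnt]

-- delta: over a duplicate-free list, the sum of "1 at w = t (when t maps to j)" is a single indicator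
theorem pvDelta (wordId : List (String × Int)) (ws : List String) (t : String) (j : Nat) (hnd : ws.Nodup) :
    (ws.map (fun w => if (pvWid wordId w).toNat = j ∧ w = t then (1 : Int) else 0)).sum
    = if t ∈ ws ∧ (pvWid wordId t).toNat = j then 1 else 0 := by
  induction ws with
  | nil => simp
  | cons w ws ih =>
      simp only [List.map_cons, List.sum_cons]
      have hnd' := List.nodup_cons.1 hnd
      rw [ih hnd'.2]
      by_cases hwt : w = t
      · have htn : t ∉ ws := hwt ▸ hnd'.1
        by_cases hj : (pvWid wordId t).toNat = j <;> simp [hwt, hj, htn]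
      · by_cases hmem : t ∈ ws <;> by_cases hj : (pvWid wordId t).toNat = j <;>
          simp [hwt, hmem, hj, Ne.symm hwt]

-- counting in-vocabulary tokens mapped to j = summing per-word token counts over the vocabulary
theorem pvCount (wordId : List (String × Int)) (toks ws : List String) (j : Nat) (hnd : ws.Nodup) :
    ((toks.countP (fun t => PySem.Set.contains ws t && decide ((pvWid wordId t).toNat = j))) : Int)
    = (ws.map (fun w => if (pvWid wordId w).toNat = j then (toks.count w : Int) else 0)).sum := by
  induction toks with
  | nil => simp
  | cons t ts ih =>
      simp only [List.countP_cons]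
      have hsplit : ∀ w : String, (if (pvWid wordId w).toNat = j then (((t :: ts).count w : Nat) : Int) else 0)
          = (if (pvWid wordId w).toNat = j then (ts.count w : Int) else 0)
            + (if (pvWid wordId w).toNat = j ∧ w = t then (1 : Int) else 0) := by
        intro w
        rw [List.count_cons]
        by_cases hwt : w = t
        · subst hwt
          by_cases hj : (pvWid wordId w).toNat = j <;> simp [hj]
        · simp [hwt, Ne.symm hwt]
      simp only [hsplit]
      rw [List.sum_map_add, ← ih, pvDelta _ _ _ _ hnd]
      by_cases hmem : t ∈ ws <;>
        by_cases hj : (pvWid wordId t).toNat = j <;>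
          simp [hmem, hj]

-- ===== VERDICT (by name: the statement is the Claim_ definition above) =====
theorem featureCat_spec : Claim_equal_featureCat := by
  intro datum words wordId wordSet _ hpre
  obtain ⟨-, hnd, hall⟩ := hpre
  have hw : ∀ w ∈ wordSet, w ∈ pvClean datum → 0 ≤ pvWid wordId w ∧ pvWid wordId w < (words.length : Int) := by
    intro w hwm hwt
    have h := (List.all_eq_true.1 hall) w hwm
    rw [Bool.or_eq_true, Bool.not_eq_true'] at h
    rcases h with h | h
    · exact absurd (List.contains_iff_mem.2 hwt) (by rw [h]; exact Bool.false_ne_true)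
    · cases hg : (PySem.Dict.mk wordId).get? w with
      | none => rw [hg] at h; simp at h
      | some i =>
          rw [hg] at h
          simp only [Option.any_some, decide_eq_true_eq] at h
          have : pvWid wordId w = i := by
            unfold pvWid
            rw [PySem.Dict.getD_eq_get?_getD, hg]
            rfl
          rw [this]; exact h
  unfold Spec_featureCat featureCat featureCat_alt
  simp only [PySem.Dict.foldl_insert_getD_add_one_eq_counter]
  refine congrArg (fun l => l ++ [1]) ?_
  have hlenA := pvA_len wordId wordSet (pvClean datum) (List.replicate words.length (0 : Int))
  apply List.ext_getElem (by simp only [hlenA, List.length_replicate, List.length_map, List.length_range])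
  intro j h1 h2
  have hjlt : j < words.length := by rw [hlenA] at h1; simpa using h1
  rw [List.getElem_map, List.getElem_range]
  rw [← List.getD_eq_getElem _ 0 h1]
  rw [pvA_get _ _ _ _ _ (by simpa using hw), pvB_get, pvCount _ _ _ _ hnd]
  rw [PySem.Dict.getD_empty]
  have hrep : List.getD (List.replicate words.length (0 : Int)) j 0 = 0 := by
    rw [List.getD_eq_getElem _ _ (by simpa using hjlt)]; simp
  rw [hrep, zero_add, zero_add]
  refine congrArg List.sum (List.map_congr_left ?_)
  intro w hwm
  by_cases hmt : w ∈ pvClean datum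
  · obtain ⟨h0, _⟩ := hw w hwm hmt
    have hiff : ((pvWid wordId w).toNat = j) ↔ (pvWid wordId w = (j : Int)) := by omega
    by_cases hj : (pvWid wordId w).toNat = j
    · rw [if_pos hj, if_pos ⟨hiff.1 hj, hmt⟩]
    · rw [if_neg hj, if_neg (fun h => hj (hiff.2 h.1))]
  · rw [if_neg (fun h : _ ∧ w ∈ pvClean datum => hmt h.2)]
    by_cases hj : (pvWid wordId w).toNat = j
    · rw [if_pos hj]
      exact_mod_cast congrArg (Nat.cast (R := Int)) (List.count_eq_zero.2 hmt)
    · rw [if_neg hj]
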